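-- pv_equiv track=rewrite | github.com/nmfoss/DAT620_delivered | modeling_tools.py | get_vs_all
-- ===== SOURCE A (Python) =====
-- def get_vs_all(buckets):
--     bucket_vs_all = []
--     for l_index in range(len(buckets)):
--         vs_all = []
--         if l_index+1 < len(buckets):
--             for r_index in range(l_index+1, len(buckets)):
--                 vs_all += buckets[r_index]
--             bucket_vs_all.append((buckets[l_index], vs_all))
--     return bucket_vs_all
-- ===== SOURCE B (Python) =====
-- def get_vs_all(buckets):
--     res = []
--     suffix = []
--     first = True
--     for b in reversed(buckets):
--         if first:
--             first = False
--         else: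
--             res.append((b, suffix))
--         suffix = list(b) + suffix
--     res.reverse()
--     return res
-- ===== Notes on version B (the rewrite author's own statement) =====
-- stated objective: alternative
-- what changed: Replaced A's nested re-scan of all later buckets for every index with a single reverse pass that maintains a running suffix concatenation and emits each (bucket, suffix) pair; cost is similar because the output itself is quadratic in size.
import Mathlib
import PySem

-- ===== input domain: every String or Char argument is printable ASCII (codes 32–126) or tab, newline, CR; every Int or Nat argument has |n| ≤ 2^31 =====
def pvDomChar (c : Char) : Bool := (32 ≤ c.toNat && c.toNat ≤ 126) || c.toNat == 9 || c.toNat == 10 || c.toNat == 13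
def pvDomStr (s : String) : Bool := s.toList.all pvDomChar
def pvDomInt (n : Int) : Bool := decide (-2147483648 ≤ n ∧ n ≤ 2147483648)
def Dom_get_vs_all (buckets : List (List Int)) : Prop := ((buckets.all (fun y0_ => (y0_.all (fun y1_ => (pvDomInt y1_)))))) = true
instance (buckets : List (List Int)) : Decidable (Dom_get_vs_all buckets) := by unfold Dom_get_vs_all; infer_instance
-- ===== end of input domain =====

-- B replaces A's nested re-scan of the later buckets with one reverse pass keeping a
-- running suffix concatenation (objective: alternative decomposition, similar cost).

-- ===== PORT A =====
def get_vs_all (buckets : List (List Int)) : List (List Int × List Int) :=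
  let n : Int := buckets.length
  (PySem.List.pyRange 0 n 1).foldl (fun bucket_vs_all l_index =>
    let vs_all : List Int := []
    if l_index + 1 < n then
      let vs_all := (PySem.List.pyRange (l_index + 1) n 1).foldl
        (fun vs r_index => vs ++ PySem.List.pyGetD buckets r_index []) vs_all
      bucket_vs_all ++ [(PySem.List.pyGetD buckets l_index [], vs_all)]
    else bucket_vs_all) []

-- ===== PORT B =====
-- reverse pass: recursion over the list processes the tail (the later buckets) first,
-- carrying `suffix` = concatenation of all buckets after the current one
def altGo : List (List Int) → List (List Int × List Int) × List Int
  | [] => ([], [])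
  | [b] => ([], b)          -- the last bucket contributes no pair ("first" in the reversed loop)
  | b :: rest => let p := altGo (rest) ; ((b, p.2) :: p.1, b ++ p.2)

def get_vs_all_alt (buckets : List (List Int)) : List (List Int × List Int) :=
  (altGo buckets).1

-- ===== PRECONDITION & SPEC =====
def Spec_get_vs_all (buckets : List (List Int)) (out : List (List Int × List Int)) : Prop := out = get_vs_all_alt buckets
instance (buckets : List (List Int)) (out : List (List Int × List Int)) : Decidable (Spec_get_vs_all buckets out) := by unfold Spec_get_vs_all; infer_instance

-- ===== CLAIM (what is proved, stated in full; the proofs are below) =====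
def Claim_equal_get_vs_all : Prop := ∀ (buckets : List (List Int)), Dom_get_vs_all buckets → Spec_get_vs_all buckets (get_vs_all buckets)

-- ===== LEMMAS AND PROOFS =====

-- common closed form: for each index i < n-1, pair (buckets[i], concat of buckets after i)
def specF (xs : List (List Int)) : List (List Int × List Int) :=
  (List.range (xs.length - 1)).map (fun i => (xs.getD i [], ((xs.drop (i + 1)).flatten)))

theorem altGo_eq (xs : List (List Int)) : altGo xs = (specF xs, xs.flatten) := by
  induction xs with
  | nil => simp [altGo, specF]
  | cons b rest ih =>
    cases rest with
    | nil => simp [altGo, specF]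
    | cons c t =>
      simp only [altGo, ih, Prod.mk.injEq]
      constructor
      · simp only [specF, List.length_cons, Nat.add_sub_cancel, List.range_succ_eq_map,
          List.map_cons, List.map_map]
        refine List.ext_getElem (by simp) ?_
        intro i h1 h2
        rcases i with _ | j <;> simp [Function.comp]
      · simp

theorem a_eq (buckets : List (List Int)) : get_vs_all buckets = specF buckets := by
  unfold get_vs_all
  rw [PySem.List.foldl_congr_mem' (g := fun acc l =>
        if l + 1 < (buckets.length : Int) then
          acc ++ [(PySem.List.pyGetD buckets l [], ((buckets.drop (l + 1).toNat).flatten))]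
        else acc)]
  · rw [PySem.List.foldl_append_ite]
    cases hb : buckets.length with
    | zero => simp [specF, hb]
    | succ m =>
      rw [PySem.List.pyRange_one 0 (((m+1:Nat)):Int)]
      simp only [List.filter_map, List.nil_append]
      have hrange : ((((m+1:Nat) : Int) - 0).toNat) = m + 1 := by omega
      rw [hrange, List.range_succ, List.filter_append]
      have h1 : List.filter ((fun x => decide (x + 1 < ((m+1:Nat):Int))) ∘ fun k : Nat => 0 + (k:Int)) (List.range m) = List.range m := by
        apply List.filter_eq_self.mpr
        intro k hk
        simp only [Function.comp, decide_eq_true_eq]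
        have := List.mem_range.mp hk
        omega
      have h2 : List.filter ((fun x => decide (x + 1 < ((m+1:Nat):Int))) ∘ fun k : Nat => 0 + (k:Int)) [m] = [] := by
        simp only [List.filter, Function.comp]
        norm_num
      rw [h1, h2, List.append_nil, List.map_map, specF, hb]
      apply List.map_congr_left
      intro k hk
      simp [Function.comp]
  · intro l hl acc
    have hl0 : 0 ≤ l := (PySem.List.mem_pyRange_one.mp hl).1
    by_cases h : l + 1 < (buckets.length : Int)
    · rw [if_pos h, if_pos h, PySem.List.foldl_append_eq_flatMap, List.flatMap_def,
        PySem.List.map_pyGetD_pyRange' buckets ([] : List Int) (by omega : (0:Int) ≤ l + 1)]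
      simp
    · simp [if_neg h]

theorem get_vs_all_spec : Claim_equal_get_vs_all := by
  intro buckets _
  show _ = _
  rw [a_eq, get_vs_all_alt, altGo_eq]
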